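-- pv_equiv track=rewrite | github.com/Bestehorn/LLMManager | test/integration/test_integration_streaming.py | _select_streaming_regions_from_available
-- ===== SOURCE A (Python) =====
-- from typing import Any, Dict, Iterator, List, Optional, Tuple
--
-- PREFERRED_STREAMING_REGIONS = ["us-east-1", "us-west-2"]
--
-- FALLBACK_STREAMING_REGIONS = ["eu-west-1", "ap-southeast-1"]
--
-- def _select_streaming_regions_from_available(available_regions: List[str]) -> List[str]:
--     """
--     Select preferred regions for streaming tests from available regions.
--
--     Args:
--         available_regions: List of regions where the model is available
--
--     Returns:
--         List of preferred regions for streaming tests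
--     """
--     if not available_regions:
--         return []
--
--     selected_regions = []
--
--     # Try preferred regions first
--     for preferred_region in PREFERRED_STREAMING_REGIONS:
--         if preferred_region in available_regions and preferred_region not in selected_regions:
--             selected_regions.append(preferred_region)
--
--     # Add fallback regions if needed
--     for fallback_region in FALLBACK_STREAMING_REGIONS:
--         if (
--             fallback_region in available_regions
--             and fallback_region not in selected_regions
--             and len(selected_regions) < 3
--         ):
--             selected_regions.append(fallback_region)
--
--     # Add any remaining regions up to 3 total
--     for region in available_regions:
--         if region not in selected_regions and len(selected_regions) < 3:
--             selected_regions.append(region)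
--
--     return selected_regions
-- ===== SOURCE B (Python) =====
-- PREFERRED_STREAMING_REGIONS = ["us-east-1", "us-west-2"]
--
-- FALLBACK_STREAMING_REGIONS = ["eu-west-1", "ap-southeast-1"]
--
-- _PRIORITY = {r: i for i, r in enumerate(PREFERRED_STREAMING_REGIONS + FALLBACK_STREAMING_REGIONS)}
--
--
-- def _select_streaming_regions_from_available(available_regions):
--     # counting/bucket sort by priority: one dedup pass placing each distinct
--     # region into its priority bucket, then concatenate buckets and take 3
--     buckets = [[], [], [], [], []]
--     seen = set()
--     for region in available_regions:
--         if region not in seen: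
--             seen.add(region)
--             buckets[_PRIORITY.get(region, 4)].append(region)
--     out = []
--     for bucket in buckets:
--         out += bucket
--     return out[:3]
-- ===== Notes on version B (the rewrite author's own statement) =====
-- stated objective: alternative
-- what changed: Replaces A's three staged loops with repeated membership scans of the growing selection by a counting/bucket sort: one dedup pass over available_regions placing each distinct region into its priority bucket (via a precomputed priority dict and a seen-set), then concatenating the five buckets and taking the first three.
import Mathlib
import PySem

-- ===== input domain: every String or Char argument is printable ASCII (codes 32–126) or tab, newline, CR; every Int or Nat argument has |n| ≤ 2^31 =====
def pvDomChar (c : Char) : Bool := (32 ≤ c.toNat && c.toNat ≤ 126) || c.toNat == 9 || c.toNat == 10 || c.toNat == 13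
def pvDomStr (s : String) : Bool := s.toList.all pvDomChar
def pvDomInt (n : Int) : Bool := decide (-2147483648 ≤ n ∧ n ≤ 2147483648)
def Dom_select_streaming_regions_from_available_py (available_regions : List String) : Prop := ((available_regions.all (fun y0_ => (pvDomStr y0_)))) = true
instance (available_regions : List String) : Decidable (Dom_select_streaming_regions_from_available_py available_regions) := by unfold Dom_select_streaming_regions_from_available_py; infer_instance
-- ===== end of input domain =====

-- B replaces A's three staged membership-scanning loops with a counting/bucket sort:
-- one dedup pass placing each distinct region in its priority bucket, then concatenate and take 3 (alternative decomposition).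

-- ===== PORT A =====
def pvPreferred : List String := ["us-east-1", "us-west-2"]
def pvFallback : List String := ["eu-west-1", "ap-southeast-1"]

-- loop 1: for preferred_region in PREFERRED: if in available and not in selected: append
def loopA1 (avail : List String) (sel : List String) : List String → List String
  | [] => sel
  | p :: rest =>
    loopA1 avail (if avail.contains p && !sel.contains p then sel ++ [p] else sel) rest

-- loop 2: fallback regions, with len(selected) < 3 cap
def loopA2 (avail : List String) (sel : List String) : List String → List String
  | [] => sel
  | p :: rest =>
    loopA2 avail (if avail.contains p && !sel.contains p && decide (sel.length < 3) then sel ++ [p] else sel) rest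

-- loop 3: remaining available regions, cap at 3
def loopA3 (sel : List String) : List String → List String
  | [] => sel
  | p :: rest =>
    loopA3 (if !sel.contains p && decide (sel.length < 3) then sel ++ [p] else sel) rest

def select_streaming_regions_from_available_py (available_regions : List String) : List String :=
  if available_regions = [] then []
  else
    loopA3 (loopA2 available_regions (loopA1 available_regions [] pvPreferred) pvFallback) available_regions

-- ===== PORT B =====
-- _PRIORITY = {r: i for i, r in enumerate(PREFERRED + FALLBACK)} — the comprehension over the literal module constants yields this literal dict
def pvPriority : PySem.Dict String Int :=
  PySem.Dict.ofList [("us-east-1", 0), ("us-west-2", 1), ("eu-west-1", 2), ("ap-southeast-1", 3)]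

-- for region in available_regions: if region not in seen: seen.add(region); buckets[_PRIORITY.get(region, 4)].append(region)
def loopBkt (st : List (List String) × PySem.Set String) : List String → List (List String) × PySem.Set String
  | [] => st
  | region :: rest =>
    if PySem.Set.contains st.2 region then loopBkt st rest
    else
      loopBkt
        (PySem.List.pySetD st.1 (pvPriority.getD region 4)
          (PySem.List.pyGetD st.1 (pvPriority.getD region 4) [] ++ [region]),
         PySem.Set.add st.2 region) rest

def select_streaming_regions_from_available_py_alt (available_regions : List String) : List String :=
  let buckets := (loopBkt ([[], [], [], [], []], PySem.Set.empty) available_regions).1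
  -- out = []; for bucket in buckets: out += bucket
  let out := buckets.foldl (fun out bucket => out ++ bucket) []
  PySem.List.slice out none (some 3)   -- out[:3]

-- ===== PRECONDITION & SPEC =====
def Spec_select_streaming_regions_from_available_py (available_regions : List String) (out : List String) : Prop := out = select_streaming_regions_from_available_py_alt available_regions
instance (available_regions : List String) (out : List String) : Decidable (Spec_select_streaming_regions_from_available_py available_regions out) := by unfold Spec_select_streaming_regions_from_available_py; infer_instance

-- ===== CLAIM (what is proved, stated in full; the proofs are below) =====
def Claim_equal_select_streaming_regions_from_available_py : Prop := ∀ (available_regions : List String), Dom_select_streaming_regions_from_available_py available_regions → Spec_select_streaming_regions_from_available_py available_regions (select_streaming_regions_from_available_py available_regions)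


-- ===== LEMMAS AND PROOFS =====

-- first occurrences of xs that are not already in seen (the dedup order of B's single pass)
def Dd (seen : PySem.Set String) : List String → List String
  | [] => []
  | r :: xs => if PySem.Set.contains seen r then Dd seen xs else r :: Dd (PySem.Set.add seen r) xs

def pvSpecial : List String := ["us-east-1", "us-west-2", "eu-west-1", "ap-southeast-1"]

theorem pvPriority_eq : pvPriority = PySem.Dict.mk
    [("us-east-1", 0), ("us-west-2", 1), ("eu-west-1", 2), ("ap-southeast-1", 3)] := by decide

theorem set_contains_eq (s : PySem.Set String) (a : String) :
    PySem.Set.contains s a = decide (a ∈ s) := by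
  simp [PySem.Set.contains, List.contains_iff_mem]

theorem prio_default (a : String) (h0 : a ≠ "us-east-1") (h1 : a ≠ "us-west-2")
    (h2 : a ≠ "eu-west-1") (h3 : a ≠ "ap-southeast-1") : pvPriority.getD a 4 = 4 := by
  rw [pvPriority_eq]
  simp [PySem.Dict.getD_eq_get?_getD, PySem.Dict.get?,
    Ne.symm h0, Ne.symm h1, Ne.symm h2, Ne.symm h3]

theorem prio_eq4_iff (a : String) :
    (pvPriority.getD a 4 == 4) = !(pvSpecial.contains a) := by
  by_cases h0 : a = "us-east-1"
  · subst h0; decide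
  by_cases h1 : a = "us-west-2"
  · subst h1; decide
  by_cases h2 : a = "eu-west-1"
  · subst h2; decide
  by_cases h3 : a = "ap-southeast-1"
  · subst h3; decide
  simp [prio_default a h0 h1 h2 h3, pvSpecial, h0, h1, h2, h3]

theorem prio_eq0 (a : String) : (pvPriority.getD a 4 == 0) = (a == "us-east-1") := by
  by_cases h0 : a = "us-east-1"
  · subst h0; decide
  by_cases h1 : a = "us-west-2"
  · subst h1; decide
  by_cases h2 : a = "eu-west-1"
  · subst h2; decide
  by_cases h3 : a = "ap-southeast-1"
  · subst h3; decide
  simp [prio_default a h0 h1 h2 h3, h0]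

theorem prio_eq1 (a : String) : (pvPriority.getD a 4 == 1) = (a == "us-west-2") := by
  by_cases h0 : a = "us-east-1"
  · subst h0; decide
  by_cases h1 : a = "us-west-2"
  · subst h1; decide
  by_cases h2 : a = "eu-west-1"
  · subst h2; decide
  by_cases h3 : a = "ap-southeast-1"
  · subst h3; decide
  simp [prio_default a h0 h1 h2 h3, h1]

theorem prio_eq2 (a : String) : (pvPriority.getD a 4 == 2) = (a == "eu-west-1") := by
  by_cases h0 : a = "us-east-1"
  · subst h0; decide
  by_cases h1 : a = "us-west-2"
  · subst h1; decide
  by_cases h2 : a = "eu-west-1"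
  · subst h2; decide
  by_cases h3 : a = "ap-southeast-1"
  · subst h3; decide
  simp [prio_default a h0 h1 h2 h3, h2]

theorem prio_eq3 (a : String) : (pvPriority.getD a 4 == 3) = (a == "ap-southeast-1") := by
  by_cases h0 : a = "us-east-1"
  · subst h0; decide
  by_cases h1 : a = "us-west-2"
  · subst h1; decide
  by_cases h2 : a = "eu-west-1"
  · subst h2; decide
  by_cases h3 : a = "ap-southeast-1"
  · subst h3; decide
  simp [prio_default a h0 h1 h2 h3, h3]

-- the bucket pass builds, in each bucket i, the priority-i elements of the dedup order
theorem loopBkt_inv (xs : List String) (b0 b1 b2 b3 b4 : List String) (seen : PySem.Set String) :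
    (loopBkt ([b0, b1, b2, b3, b4], seen) xs).1 =
      [b0 ++ (Dd seen xs).filter (fun r => pvPriority.getD r 4 == 0),
       b1 ++ (Dd seen xs).filter (fun r => pvPriority.getD r 4 == 1),
       b2 ++ (Dd seen xs).filter (fun r => pvPriority.getD r 4 == 2),
       b3 ++ (Dd seen xs).filter (fun r => pvPriority.getD r 4 == 3),
       b4 ++ (Dd seen xs).filter (fun r => pvPriority.getD r 4 == 4)] := by
  induction xs generalizing b0 b1 b2 b3 b4 seen with
  | nil => simp [loopBkt, Dd]
  | cons r rest ih =>
    by_cases hs : r ∈ seen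
    · have hs' : PySem.Set.contains seen r = true := by simp [set_contains_eq, hs]
      simp [loopBkt, Dd, hs, hs', ih]
    · have hs' : PySem.Set.contains seen r = false := by simp [set_contains_eq, hs]
      have hadd : PySem.Set.add seen r = seen ++ [r] := by
        simp [PySem.Set.add, set_contains_eq, hs]
      by_cases h0 : r = "us-east-1"
      · subst h0
        have hp : pvPriority.getD "us-east-1" 4 = 0 := by rw [pvPriority_eq]; decide
        simp only [loopBkt, hs', Bool.false_eq_true, if_false, hp]
        rw [show PySem.List.pySetD [b0, b1, b2, b3, b4] (0 : Int)
              (PySem.List.pyGetD [b0, b1, b2, b3, b4] (0 : Int) [] ++ ["us-east-1"])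
            = [b0 ++ ["us-east-1"], b1, b2, b3, b4] from by
          simp [PySem.List.pySetD, PySem.List.pySet?, PySem.List.pyGetD, PySem.List.pyGet?,
            PySem.List.pyIdx?]]
        rw [ih, hadd]
        simp [Dd, hs, hs', hadd, List.filter_cons, prio_eq0, prio_eq1, prio_eq2, prio_eq3, prio_eq4_iff,
          pvSpecial]
      by_cases h1 : r = "us-west-2"
      · subst h1
        have hp : pvPriority.getD "us-west-2" 4 = 1 := by rw [pvPriority_eq]; decide
        simp only [loopBkt, hs', Bool.false_eq_true, if_false, hp]
        rw [show PySem.List.pySetD [b0, b1, b2, b3, b4] (1 : Int)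
              (PySem.List.pyGetD [b0, b1, b2, b3, b4] (1 : Int) [] ++ ["us-west-2"])
            = [b0, b1 ++ ["us-west-2"], b2, b3, b4] from by
          simp [PySem.List.pySetD, PySem.List.pySet?, PySem.List.pyGetD, PySem.List.pyGet?,
            PySem.List.pyIdx?]]
        rw [ih, hadd]
        simp [Dd, hs, hs', hadd, List.filter_cons, prio_eq0, prio_eq1, prio_eq2, prio_eq3, prio_eq4_iff,
          pvSpecial]
      by_cases h2 : r = "eu-west-1"
      · subst h2
        have hp : pvPriority.getD "eu-west-1" 4 = 2 := by rw [pvPriority_eq]; decide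
        simp only [loopBkt, hs', Bool.false_eq_true, if_false, hp]
        rw [show PySem.List.pySetD [b0, b1, b2, b3, b4] (2 : Int)
              (PySem.List.pyGetD [b0, b1, b2, b3, b4] (2 : Int) [] ++ ["eu-west-1"])
            = [b0, b1, b2 ++ ["eu-west-1"], b3, b4] from by
          simp [PySem.List.pySetD, PySem.List.pySet?, PySem.List.pyGetD, PySem.List.pyGet?,
            PySem.List.pyIdx?]]
        rw [ih, hadd]
        simp [Dd, hs, hs', hadd, List.filter_cons, prio_eq0, prio_eq1, prio_eq2, prio_eq3, prio_eq4_iff,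
          pvSpecial]
      by_cases h3 : r = "ap-southeast-1"
      · subst h3
        have hp : pvPriority.getD "ap-southeast-1" 4 = 3 := by rw [pvPriority_eq]; decide
        simp only [loopBkt, hs', Bool.false_eq_true, if_false, hp]
        rw [show PySem.List.pySetD [b0, b1, b2, b3, b4] (3 : Int)
              (PySem.List.pyGetD [b0, b1, b2, b3, b4] (3 : Int) [] ++ ["ap-southeast-1"])
            = [b0, b1, b2, b3 ++ ["ap-southeast-1"], b4] from by
          simp [PySem.List.pySetD, PySem.List.pySet?, PySem.List.pyGetD, PySem.List.pyGet?,
            PySem.List.pyIdx?]]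
        rw [ih, hadd]
        simp [Dd, hs, hs', hadd, List.filter_cons, prio_eq0, prio_eq1, prio_eq2, prio_eq3, prio_eq4_iff,
          pvSpecial]
      · have hp : pvPriority.getD r 4 = 4 := prio_default r h0 h1 h2 h3
        simp only [loopBkt, hs', Bool.false_eq_true, if_false, hp]
        rw [show PySem.List.pySetD [b0, b1, b2, b3, b4] (4 : Int)
              (PySem.List.pyGetD [b0, b1, b2, b3, b4] (4 : Int) [] ++ [r])
            = [b0, b1, b2, b3, b4 ++ [r]] from by
          simp [PySem.List.pySetD, PySem.List.pySet?, PySem.List.pyGetD, PySem.List.pyGet?,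
            PySem.List.pyIdx?]]
        rw [ih, hadd]
        simp [Dd, hs, hs', hadd, List.filter_cons, prio_eq0, prio_eq1, prio_eq2, prio_eq3, prio_eq4_iff,
          pvSpecial, h0, h1, h2, h3]

theorem mem_Dd (xs : List String) (seen : PySem.Set String) (a : String) :
    a ∈ Dd seen xs ↔ a ∈ xs ∧ ¬ a ∈ seen := by
  induction xs generalizing seen with
  | nil => simp [Dd]
  | cons r rest ih =>
    by_cases hs : r ∈ seen
    · have hs' : PySem.Set.contains seen r = true := by simp [set_contains_eq, hs]
      simp only [Dd, hs', if_true]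
      rw [ih]
      constructor
      · rintro ⟨hm, hn⟩; exact ⟨List.mem_cons_of_mem _ hm, hn⟩
      · rintro ⟨hm, hn⟩
        rcases List.mem_cons.mp hm with rfl | hm'
        · exact absurd hs hn
        · exact ⟨hm', hn⟩
    · have hs' : PySem.Set.contains seen r = false := by simp [set_contains_eq, hs]
      have hadd : PySem.Set.add seen r = seen ++ [r] := by
        simp [PySem.Set.add, set_contains_eq, hs]
      simp only [Dd, hs', Bool.false_eq_true, if_false]
      constructor
      · intro hm
        rcases List.mem_cons.mp hm with rfl | hm'
        · exact ⟨List.mem_cons_self, hs⟩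
        · rw [ih] at hm'
          rcases hm' with ⟨hmr, hns⟩
          rw [hadd] at hns; simp at hns
          exact ⟨List.mem_cons_of_mem _ hmr, hns.1⟩
      · rintro ⟨hm, hn⟩
        rcases List.mem_cons.mp hm with rfl | hm'
        · exact List.mem_cons_self
        · by_cases har : a = r
          · subst har; exact List.mem_cons_self
          · apply List.mem_cons_of_mem
            rw [ih, hadd]
            simp [hn, har, hm']

theorem nodup_Dd (xs : List String) (seen : PySem.Set String) : (Dd seen xs).Nodup := by
  induction xs generalizing seen with
  | nil => simp [Dd]
  | cons r rest ih =>
    by_cases hs : PySem.Set.contains seen r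
    · simp only [Dd, if_pos hs]; exact ih seen
    · simp only [Dd, if_neg hs]
      refine List.nodup_cons.mpr ⟨?_, ih _⟩
      intro hmem
      rw [mem_Dd] at hmem
      have : r ∈ PySem.Set.add seen r := by
        by_cases hcr : r ∈ seen
        · have hb : PySem.Set.contains seen r = true := by simp [set_contains_eq, hcr]
          simp [PySem.Set.add, hb, hcr]
        · have hb : PySem.Set.contains seen r = false := by simp [set_contains_eq, hcr]
          simp [PySem.Set.add, hb, hcr]
      exact hmem.2 this

theorem filter_beq_single (l : List String) (hnd : l.Nodup) (s : String) :
    l.filter (fun a => a == s) = if s ∈ l then [s] else [] := by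
  induction l with
  | nil => simp
  | cons r rest ih =>
    rcases List.nodup_cons.mp hnd with ⟨hr, hrest⟩
    by_cases hrs : r = s
    · subst hrs
      simp [List.filter_cons, ih hrest, hr]
    · simp [List.filter_cons, hrs, ih hrest, List.mem_cons, Ne.symm hrs]

-- loop 3 leaves a full selection alone …
theorem loopA3_of_len3 (xs sel : List String) (h : sel.length = 3) : loopA3 sel xs = sel := by
  induction xs with
  | nil => rfl
  | cons r rest ih => simp [loopA3, h, ih]

-- … and otherwise appends the unseen first occurrences, truncated to 3 in total
theorem loopA3_eq (xs sel : List String) (h : sel.length ≤ 3) :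
    loopA3 sel xs = (sel ++ Dd sel xs).take 3 := by
  induction xs generalizing sel with
  | nil => simp [loopA3, Dd, List.take_of_length_le h]
  | cons r rest ih =>
    by_cases hc : r ∈ sel
    · have hc' : PySem.Set.contains sel r = true := by simp [set_contains_eq, hc]
      have hc2 : sel.contains r = true := hc'
      simp only [loopA3, Dd, hc', hc2, if_true, Bool.not_true, Bool.false_and, Bool.false_eq_true,
        if_false]
      exact ih sel h
    · have hc' : PySem.Set.contains sel r = false := by simp [set_contains_eq, hc]
      have hc2 : sel.contains r = false := hc'
      have hadd : PySem.Set.add sel r = sel ++ [r] := by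
        simp [PySem.Set.add, set_contains_eq, hc]
      by_cases h3 : sel.length = 3
      · have hlt : (decide (sel.length < 3)) = false := by simp [h3]
        simp only [loopA3, Dd, hc', hc2, hlt, Bool.and_false, Bool.false_eq_true, if_false]
        rw [loopA3_of_len3 _ _ h3, hadd]
        rw [show sel ++ r :: Dd (sel ++ [r]) rest = sel ++ (r :: Dd (sel ++ [r]) rest) from rfl]
        rw [List.take_append_of_le_length (by omega)]
        exact (List.take_of_length_le (by omega)).symm
      · have hlt : (decide (sel.length < 3)) = true := by simp; omega
        simp only [loopA3, Dd, hc', hc2, hlt, Bool.not_false, Bool.and_true, Bool.false_eq_true,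
          if_true, if_false]
        rw [ih (sel ++ [r]) (by simp; omega), hadd]
        congr 1
        simp

-- a seen-set that additionally holds exactly the specials filters them out of the dedup order
theorem Dd_filter_special (xs : List String) (seenA seenB : PySem.Set String)
    (h : ∀ a ∈ xs, (a ∈ seenA ↔ (a ∈ seenB ∨ a ∈ pvSpecial))) :
    Dd seenA xs = (Dd seenB xs).filter (fun a => pvPriority.getD a 4 == 4) := by
  induction xs generalizing seenA seenB with
  | nil => simp [Dd]
  | cons r rest ih =>
    have hr := h r List.mem_cons_self
    have hrest : ∀ a ∈ rest, (a ∈ seenA ↔ (a ∈ seenB ∨ a ∈ pvSpecial)) :=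
      fun a ha => h a (List.mem_cons_of_mem _ ha)
    have haddA : ∀ (s : PySem.Set String) (x a : String),
        a ∈ PySem.Set.add s x ↔ (a ∈ s ∨ a = x) := by
      intro s x a
      by_cases hcx : x ∈ s
      · have hb : PySem.Set.contains s x = true := by simp [set_contains_eq, hcx]
        have hb2 : s.contains x = true := hb
        simp only [PySem.Set.add, hb, hb2, if_true]
        constructor
        · exact Or.inl
        · rintro (h' | rfl)
          · exact h'
          · exact hcx
      · have hb : PySem.Set.contains s x = false := by simp [set_contains_eq, hcx]
        have hb2 : s.contains x = false := hb
        simp [PySem.Set.add, hb, hb2, hcx]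
    by_cases hsp : r ∈ pvSpecial
    · have hA : PySem.Set.contains seenA r = true := by
        simp [set_contains_eq, hr.mpr (Or.inr hsp)]
      by_cases hB : r ∈ seenB
      · have hB' : PySem.Set.contains seenB r = true := by simp [set_contains_eq, hB]
        simp only [Dd, hA, hB', if_true]
        exact ih seenA seenB hrest
      · have hB' : PySem.Set.contains seenB r = false := by simp [set_contains_eq, hB]
        simp only [Dd, hA, hB', if_true, Bool.false_eq_true, if_false]
        rw [List.filter_cons]
        have hpr : (pvPriority.getD r 4 == 4) = false := by
          rw [prio_eq4_iff]
          simp [List.contains_iff_mem, hsp]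
        rw [hpr]
        simp only [Bool.false_eq_true, if_false]
        apply ih seenA (PySem.Set.add seenB r)
        intro a ha
        rw [haddA]
        have hiff := hrest a ha
        constructor
        · intro hA'
          rcases hiff.mp hA' with hB'' | hsp'
          · exact Or.inl (Or.inl hB'')
          · exact Or.inr hsp'
        · rintro ((hB'' | rfl) | hsp')
          · exact hiff.mpr (Or.inl hB'')
          · exact hiff.mpr (Or.inr hsp)
          · exact hiff.mpr (Or.inr hsp')
    · have heq : PySem.Set.contains seenA r = PySem.Set.contains seenB r := by
        by_cases hB : r ∈ seenB
        · simp [set_contains_eq, hB, hr.mpr (Or.inl hB)]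
        · have : ¬ r ∈ seenA := by
            intro hA'
            rcases hr.mp hA' with hB' | hsp'
            · exact hB hB'
            · exact hsp hsp'
          simp [set_contains_eq, hB, this]
      by_cases hB : r ∈ seenB
      · have hB' : PySem.Set.contains seenB r = true := by simp [set_contains_eq, hB]
        simp only [Dd, heq, hB', if_true]
        exact ih seenA seenB hrest
      · have hB' : PySem.Set.contains seenB r = false := by simp [set_contains_eq, hB]
        simp only [Dd, heq, hB', Bool.false_eq_true, if_false]
        rw [List.filter_cons]
        have hpr : (pvPriority.getD r 4 == 4) = true := by
          rw [prio_eq4_iff]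
          simp [List.contains_iff_mem, hsp]
        rw [hpr]
        simp only [if_true]
        congr 1
        apply ih (PySem.Set.add seenA r) (PySem.Set.add seenB r)
        intro a ha
        rw [haddA, haddA]
        have hiff := hrest a ha
        constructor
        · rintro (hA' | rfl)
          · rcases hiff.mp hA' with hB'' | hsp'
            · exact Or.inl (Or.inl hB'')
            · exact Or.inr hsp'
          · exact Or.inl (Or.inr rfl)
        · rintro ((hB'' | rfl) | hsp')
          · exact Or.inl (hiff.mpr (Or.inl hB''))
          · exact Or.inr rfl
          · exact Or.inl (hiff.mpr (Or.inr hsp'))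

theorem Dd_spec_sel (avail sel : List String)
    (hsub : ∀ a ∈ sel, a ∈ pvSpecial)
    (hsup : ∀ a ∈ pvSpecial, a ∈ avail → a ∈ sel) :
    Dd sel avail = (Dd [] avail).filter (fun a => pvPriority.getD a 4 == 4) := by
  apply Dd_filter_special
  intro a ha
  constructor
  · intro h; exact Or.inr (hsub a h)
  · rintro (h | h)
    · exact (List.not_mem_nil h).elim
    · exact hsup a h ha

-- ===== VERDICT (by name: the statement is the Claim_ definition above) =====
theorem select_streaming_regions_from_available_py_spec : Claim_equal_select_streaming_regions_from_available_py := by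
  intro avail _
  unfold Spec_select_streaming_regions_from_available_py
  by_cases hE : avail = []
  · subst hE; decide
  · have hB : select_streaming_regions_from_available_py_alt avail =
        ((Dd [] avail).filter (fun r => pvPriority.getD r 4 == 0) ++
         ((Dd [] avail).filter (fun r => pvPriority.getD r 4 == 1) ++
          ((Dd [] avail).filter (fun r => pvPriority.getD r 4 == 2) ++
           ((Dd [] avail).filter (fun r => pvPriority.getD r 4 == 3) ++
            (Dd [] avail).filter (fun r => pvPriority.getD r 4 == 4))))).take 3 := by
      unfold select_streaming_regions_from_available_py_alt
      rw [show (PySem.Set.empty : PySem.Set String) = ([] : List String) from rfl]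
      rw [loopBkt_inv]
      simp [PySem.List.slice, PySem.List.clampIdx, List.append_assoc]
    rw [hB]
    simp only [select_streaming_regions_from_available_py, if_neg hE]
    have hDd : ∀ a : String, (a ∈ Dd [] avail) = (a ∈ avail) := by
      intro a; rw [eq_iff_iff, mem_Dd]; simp
    have hF0 : (Dd [] avail).filter (fun r => pvPriority.getD r 4 == 0) =
        if "us-east-1" ∈ avail then ["us-east-1"] else [] := by
      rw [List.filter_congr (fun a _ => prio_eq0 a), filter_beq_single _ (nodup_Dd avail [])]
      simp only [hDd]
    have hF1 : (Dd [] avail).filter (fun r => pvPriority.getD r 4 == 1) =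
        if "us-west-2" ∈ avail then ["us-west-2"] else [] := by
      rw [List.filter_congr (fun a _ => prio_eq1 a), filter_beq_single _ (nodup_Dd avail [])]
      simp only [hDd]
    have hF2 : (Dd [] avail).filter (fun r => pvPriority.getD r 4 == 2) =
        if "eu-west-1" ∈ avail then ["eu-west-1"] else [] := by
      rw [List.filter_congr (fun a _ => prio_eq2 a), filter_beq_single _ (nodup_Dd avail [])]
      simp only [hDd]
    have hF3 : (Dd [] avail).filter (fun r => pvPriority.getD r 4 == 3) =
        if "ap-southeast-1" ∈ avail then ["ap-southeast-1"] else [] := by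
      rw [List.filter_congr (fun a _ => prio_eq3 a), filter_beq_single _ (nodup_Dd avail [])]
      simp only [hDd]
    rw [hF0, hF1, hF2, hF3]
    cases c0 : avail.contains "us-east-1" <;> cases c1 : avail.contains "us-west-2" <;>
      cases c2 : avail.contains "eu-west-1" <;> cases c3 : avail.contains "ap-southeast-1" <;>
      simp only [loopA1, loopA2, pvPreferred, pvFallback, c0, c1, c2, c3] <;>
      simp only [← List.contains_iff_mem, c0, c1, c2, c3] <;>
      norm_num <;>
      (try simp only [String.reduceEq, reduceIte]) <;>
      (try repeat first | rw [if_pos (by decide)] | rw [if_neg (by decide)]) <;>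
      (try simp only [List.cons_append, List.nil_append])
    · rw [loopA3_eq _ _ (by decide)]
      rw [Dd_spec_sel avail ([] : List String) (by decide) (by
        intro a hsp ha
        simp only [pvSpecial, List.mem_cons, List.not_mem_nil, or_false] at hsp
        rcases hsp with rfl | rfl | rfl | rfl <;>
          first
            | decide
            | exact absurd (List.contains_iff_mem.mpr ha) (by simp only [c0, c1, c2, c3]; simp))]
      simp
    · rw [loopA3_eq _ _ (by decide)]
      rw [Dd_spec_sel avail (["ap-southeast-1"] : List String) (by decide) (by
        intro a hsp ha
        simp only [pvSpecial, List.mem_cons, List.not_mem_nil, or_false] at hsp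
        rcases hsp with rfl | rfl | rfl | rfl <;>
          first
            | decide
            | exact absurd (List.contains_iff_mem.mpr ha) (by simp only [c0, c1, c2, c3]; simp))]
      simp
    · rw [loopA3_eq _ _ (by decide)]
      rw [Dd_spec_sel avail (["eu-west-1"] : List String) (by decide) (by
        intro a hsp ha
        simp only [pvSpecial, List.mem_cons, List.not_mem_nil, or_false] at hsp
        rcases hsp with rfl | rfl | rfl | rfl <;>
          first
            | decide
            | exact absurd (List.contains_iff_mem.mpr ha) (by simp only [c0, c1, c2, c3]; simp))]
      simp
    · rw [loopA3_eq _ _ (by decide)]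
      rw [Dd_spec_sel avail (["eu-west-1", "ap-southeast-1"] : List String) (by decide) (by
        intro a hsp ha
        simp only [pvSpecial, List.mem_cons, List.not_mem_nil, or_false] at hsp
        rcases hsp with rfl | rfl | rfl | rfl <;>
          first
            | decide
            | exact absurd (List.contains_iff_mem.mpr ha) (by simp only [c0, c1, c2, c3]; simp))]
      simp
    · rw [loopA3_eq _ _ (by decide)]
      rw [Dd_spec_sel avail (["us-west-2"] : List String) (by decide) (by
        intro a hsp ha
        simp only [pvSpecial, List.mem_cons, List.not_mem_nil, or_false] at hsp
        rcases hsp with rfl | rfl | rfl | rfl <;>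
          first
            | decide
            | exact absurd (List.contains_iff_mem.mpr ha) (by simp only [c0, c1, c2, c3]; simp))]
      simp
    · rw [loopA3_eq _ _ (by decide)]
      rw [Dd_spec_sel avail (["us-west-2", "ap-southeast-1"] : List String) (by decide) (by
        intro a hsp ha
        simp only [pvSpecial, List.mem_cons, List.not_mem_nil, or_false] at hsp
        rcases hsp with rfl | rfl | rfl | rfl <;>
          first
            | decide
            | exact absurd (List.contains_iff_mem.mpr ha) (by simp only [c0, c1, c2, c3]; simp))]
      simp
    · rw [loopA3_eq _ _ (by decide)]
      rw [Dd_spec_sel avail (["us-west-2", "eu-west-1"] : List String) (by decide) (by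
        intro a hsp ha
        simp only [pvSpecial, List.mem_cons, List.not_mem_nil, or_false] at hsp
        rcases hsp with rfl | rfl | rfl | rfl <;>
          first
            | decide
            | exact absurd (List.contains_iff_mem.mpr ha) (by simp only [c0, c1, c2, c3]; simp))]
      simp
    · rw [loopA3_eq _ _ (by decide)]
      rw [Dd_spec_sel avail (["us-west-2", "eu-west-1", "ap-southeast-1"] : List String) (by decide) (by
        intro a hsp ha
        simp only [pvSpecial, List.mem_cons, List.not_mem_nil, or_false] at hsp
        rcases hsp with rfl | rfl | rfl | rfl <;>
          first
            | decide
            | exact absurd (List.contains_iff_mem.mpr ha) (by simp only [c0, c1, c2, c3]; simp))]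
      simp
    · rw [loopA3_eq _ _ (by decide)]
      rw [Dd_spec_sel avail (["us-east-1"] : List String) (by decide) (by
        intro a hsp ha
        simp only [pvSpecial, List.mem_cons, List.not_mem_nil, or_false] at hsp
        rcases hsp with rfl | rfl | rfl | rfl <;>
          first
            | decide
            | exact absurd (List.contains_iff_mem.mpr ha) (by simp only [c0, c1, c2, c3]; simp))]
      simp
    · rw [loopA3_eq _ _ (by decide)]
      rw [Dd_spec_sel avail (["us-east-1", "ap-southeast-1"] : List String) (by decide) (by
        intro a hsp ha
        simp only [pvSpecial, List.mem_cons, List.not_mem_nil, or_false] at hsp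
        rcases hsp with rfl | rfl | rfl | rfl <;>
          first
            | decide
            | exact absurd (List.contains_iff_mem.mpr ha) (by simp only [c0, c1, c2, c3]; simp))]
      simp
    · rw [loopA3_eq _ _ (by decide)]
      rw [Dd_spec_sel avail (["us-east-1", "eu-west-1"] : List String) (by decide) (by
        intro a hsp ha
        simp only [pvSpecial, List.mem_cons, List.not_mem_nil, or_false] at hsp
        rcases hsp with rfl | rfl | rfl | rfl <;>
          first
            | decide
            | exact absurd (List.contains_iff_mem.mpr ha) (by simp only [c0, c1, c2, c3]; simp))]
      simp
    · rw [loopA3_eq _ _ (by decide)]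
      rw [Dd_spec_sel avail (["us-east-1", "eu-west-1", "ap-southeast-1"] : List String) (by decide) (by
        intro a hsp ha
        simp only [pvSpecial, List.mem_cons, List.not_mem_nil, or_false] at hsp
        rcases hsp with rfl | rfl | rfl | rfl <;>
          first
            | decide
            | exact absurd (List.contains_iff_mem.mpr ha) (by simp only [c0, c1, c2, c3]; simp))]
      simp
    · rw [loopA3_eq _ _ (by decide)]
      rw [Dd_spec_sel avail (["us-east-1", "us-west-2"] : List String) (by decide) (by
        intro a hsp ha
        simp only [pvSpecial, List.mem_cons, List.not_mem_nil, or_false] at hsp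
        rcases hsp with rfl | rfl | rfl | rfl <;>
          first
            | decide
            | exact absurd (List.contains_iff_mem.mpr ha) (by simp only [c0, c1, c2, c3]; simp))]
      simp
    · rw [loopA3_eq _ _ (by decide)]
      rw [Dd_spec_sel avail (["us-east-1", "us-west-2", "ap-southeast-1"] : List String) (by decide) (by
        intro a hsp ha
        simp only [pvSpecial, List.mem_cons, List.not_mem_nil, or_false] at hsp
        rcases hsp with rfl | rfl | rfl | rfl <;>
          first
            | decide
            | exact absurd (List.contains_iff_mem.mpr ha) (by simp only [c0, c1, c2, c3]; simp))]
      simp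
    · exact loopA3_of_len3 avail _ rfl
    · exact loopA3_of_len3 avail _ rfl
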